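-- pv_equiv track=rewrite | github.com/Max-Prilutsky/Sylver_Coinage | SylverCoinageData.py | positionAfterPlayingMove
-- ===== SOURCE A (Python) =====
-- def positionAfterPlayingMove(gaps : list, move : int):
--     part_of_semigroup = [element for element in range(max(gaps)) if element not in gaps]
--     not_in_new_gaps = []
--     for gap in gaps:
--         for element in part_of_semigroup:
--             if(gap - element < 0):
--                 break
--             else:
--                 if((gap-element)%move == 0):
--                     not_in_new_gaps.append(gap)
--                     break
--     return [gap for gap in gaps if(gap not in not_in_new_gaps)]
-- ===== SOURCE B (Python) =====
-- def positionAfterPlayingMove(gaps : list, move : int):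
--     gap_set = set(gaps)
--     first = {}
--     for e in range(max(gaps)):
--         if e not in gap_set:
--             r = e % move
--             if r not in first:
--                 first[r] = e
--     return [g for g in gaps if g % move not in first or first[g % move] > g]
-- ===== Notes on version B (the rewrite author's own statement) =====
-- stated objective: faster
-- what changed: Replaced the per-gap scan over the semigroup-part list by a dict mapping each residue mod move to the smallest non-gap element below max(gaps), so each gap is decided by one O(1) lookup; Pre_ excludes empty gaps (A's max raises) and move = 0 (the '%' raises on almost all inputs, and on the few where A's scan never reaches it B's lookup still raises).
-- outside the precondition, e.g. on positionAfterPlayingMove([0], 0): A returns [0], B raises ZeroDivisionError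
import Mathlib
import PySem

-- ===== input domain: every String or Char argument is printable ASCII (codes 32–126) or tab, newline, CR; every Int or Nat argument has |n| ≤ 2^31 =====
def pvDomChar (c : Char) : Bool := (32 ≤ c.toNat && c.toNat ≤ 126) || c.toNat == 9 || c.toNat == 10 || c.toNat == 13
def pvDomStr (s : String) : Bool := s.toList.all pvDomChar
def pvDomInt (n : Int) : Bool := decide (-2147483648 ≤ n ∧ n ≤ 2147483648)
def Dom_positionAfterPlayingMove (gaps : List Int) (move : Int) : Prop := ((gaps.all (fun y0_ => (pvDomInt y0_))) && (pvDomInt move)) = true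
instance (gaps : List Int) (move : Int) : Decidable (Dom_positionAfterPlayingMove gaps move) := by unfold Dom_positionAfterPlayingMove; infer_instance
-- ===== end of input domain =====

-- ===== PORT A =====
-- B replaces A's per-gap scan of the semigroup-part list by a dict from residue mod move
-- to the smallest non-gap element below max(gaps): one O(1) lookup per gap (objective: faster).

-- A's inner 'for element in part_of_semigroup: break/append' loop
def pvInnerA (gap mv : Int) : List Int → Bool
  | [] => false
  | e :: rest =>
    if gap - e < 0 then false
    else if PySem.Int.mod (gap - e) mv = 0 then true
    else pvInnerA gap mv rest

def positionAfterPlayingMove (gaps : List Int) (move : Int) : List Int :=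
  -- max(gaps) raises on []; Pre_ excludes [], so the .getD 0 default is never used under Pre_
  let part := (PySem.List.pyRange 0 ((PySem.List.max? gaps (fun x => x)).getD 0) 1).filter
      (fun e => decide (e ∉ gaps))
  let notInNewGaps := gaps.foldl
      (fun acc gap => if pvInnerA gap move part then acc ++ [gap] else acc) []
  gaps.filter (fun gap => decide (gap ∉ notInNewGaps))

-- ===== PORT B =====
def positionAfterPlayingMove_alt (gaps : List Int) (move : Int) : List Int :=
  let gapSet := PySem.Set.ofList gaps
  let first := (PySem.List.pyRange 0 ((PySem.List.max? gaps (fun x => x)).getD 0) 1).foldl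
      (fun (d : Std.HashMap Int Int) e =>
        if !(PySem.Set.contains gapSet e) then
          if !(d.contains (PySem.Int.mod e move)) then
            d.insert (PySem.Int.mod e move) e
          else d
        else d)
      Std.HashMap.emptyWithCapacity
  gaps.filter (fun g =>
    match first[PySem.Int.mod g move]? with
    | none => true
    | some v => decide (v > g))

-- ===== PRECONDITION & SPEC =====
-- Pre_ excludes empty gaps (A's max(gaps) raises ValueError) and move = 0 (the '% move' raises
-- ZeroDivisionError on almost all inputs; on the few where A's scan never reaches the '%', A
-- returns the input unchanged but B's modular lookup still raises).
def Pre_positionAfterPlayingMove (gaps : List Int) (move : Int) : Prop :=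
  gaps ≠ [] ∧ move ≠ 0
instance (gaps : List Int) (move : Int) : Decidable (Pre_positionAfterPlayingMove gaps move) := by
  unfold Pre_positionAfterPlayingMove; infer_instance
def pvWitness_positionAfterPlayingMove : List Int × Int := ([1, 2, 5], 4)

def Spec_positionAfterPlayingMove (gaps : List Int) (move : Int) (out : List Int) : Prop := out = positionAfterPlayingMove_alt gaps move
instance (gaps : List Int) (move : Int) (out : List Int) : Decidable (Spec_positionAfterPlayingMove gaps move out) := by unfold Spec_positionAfterPlayingMove; infer_instance

-- ===== CLAIM (what is proved, stated in full; the proofs are below) =====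
def Claim_equal_positionAfterPlayingMove : Prop := ∀ (gaps : List Int) (move : Int), Dom_positionAfterPlayingMove gaps move → Pre_positionAfterPlayingMove gaps move → Spec_positionAfterPlayingMove gaps move (positionAfterPlayingMove gaps move)

-- ===== LEMMAS AND PROOFS =====

-- Python '(g - e) % mv == 0' says 'e and g share a residue mod mv'
theorem pvModEq (g e mv : Int) (hmv : mv ≠ 0) :
    PySem.Int.mod (g - e) mv = 0 ↔ PySem.Int.mod e mv = PySem.Int.mod g mv := by
  rw [PySem.Int.mod_eq_zero_iff_dvd]
  have h1 := PySem.Int.floordiv_mul_add_mod g mv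
  have h2 := PySem.Int.floordiv_mul_add_mod e mv
  constructor
  · rintro ⟨k, hk⟩
    have hd : mv ∣ (PySem.Int.mod g mv - PySem.Int.mod e mv) :=
      ⟨k - PySem.Int.floordiv g mv + PySem.Int.floordiv e mv, by linear_combination h1 - h2 + hk⟩
    have habs : |PySem.Int.mod g mv - PySem.Int.mod e mv| < |mv| := by
      rcases lt_or_gt_of_ne hmv with hneg | hpos
      · have b1 := PySem.Int.mod_neg_bounds (a := g) hneg
        have b2 := PySem.Int.mod_neg_bounds (a := e) hneg
        rw [abs_of_neg hneg, abs_lt]; omega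
      · have b1l := PySem.Int.mod_nonneg (a := g) hpos
        have b1u := PySem.Int.mod_lt (a := g) hpos
        have b2l := PySem.Int.mod_nonneg (a := e) hpos
        have b2u := PySem.Int.mod_lt (a := e) hpos
        rw [abs_of_pos hpos, abs_lt]; omega
    have := Int.eq_zero_of_abs_lt_dvd ((abs_dvd mv _).mpr hd) habs
    omega
  · intro h
    exact ⟨PySem.Int.floordiv g mv - PySem.Int.floordiv e mv, by linear_combination -h1 + h2 - h⟩

-- B's dict fold, read at key r, yields the first skip-filtered element with residue r
theorem pvGetFoldD (mv : Int) (c : Int → Bool) (l : List Int) (d : Std.HashMap Int Int) (r : Int) :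
    ((l.foldl
      (fun (d : Std.HashMap Int Int) e =>
        if !(c e) then
          if !(d.contains (PySem.Int.mod e mv)) then
            d.insert (PySem.Int.mod e mv) e
          else d
        else d) d)[r]?)
      = (d[r]?).or
          ((l.filter (fun e => !(c e))).find? (fun e => PySem.Int.mod e mv == r)) := by
  induction l generalizing d with
  | nil => simp
  | cons e rest ih =>
    simp only [List.foldl_cons, List.filter_cons]
    cases hc : c e with
    | true =>
      simp only [Bool.not_true, Bool.false_eq_true, if_false]
      exact ih d
    | false =>
      simp only [Bool.not_false, if_true, List.find?_cons]
      cases hct : d.contains (PySem.Int.mod e mv) with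
      | false =>
        rw [if_pos (by simp)]
        rw [ih]
        by_cases hkr : PySem.Int.mod e mv = r
        · subst hkr
          have hnone : d[PySem.Int.mod e mv]? = none := by
            have h := Std.HashMap.contains_eq_isSome_getElem? (m := d) (a := PySem.Int.mod e mv)
            rw [hct] at h
            cases hh : d[PySem.Int.mod e mv]? <;> simp [hh] at h ⊢
          rw [Std.HashMap.getElem?_insert, if_pos (by simp), hnone]
          simp
        · rw [Std.HashMap.getElem?_insert, if_neg (by simp [hkr])]
          have hbe : (PySem.Int.mod e mv == r) = false := by simp [hkr]
          simp [hbe]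
      | true =>
        rw [if_neg (by simp)]
        rw [ih]
        by_cases hkr : PySem.Int.mod e mv = r
        · have hsome : (d[r]?).isSome = true := by
            rw [← hkr, ← Std.HashMap.contains_eq_isSome_getElem?, hct]
          obtain ⟨v, hv⟩ := Option.isSome_iff_exists.mp hsome
          simp [hv]
        · have hbe : (PySem.Int.mod e mv == r) = false := by simp [hkr]
          simp [hbe]

-- A's break-at-first-overshoot scan over a strictly increasing list is an existence test
theorem pvInnerA_iff (g mv : Int) (l : List Int) (hs : l.Pairwise (· < ·)) :
    pvInnerA g mv l = true ↔ ∃ e ∈ l, e ≤ g ∧ PySem.Int.mod (g - e) mv = 0 := by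
  induction l with
  | nil => simp [pvInnerA]
  | cons e rest ih =>
    obtain ⟨hlt, htail⟩ := List.pairwise_cons.mp hs
    rw [pvInnerA]
    by_cases h1 : g - e < 0
    · rw [if_pos h1]
      constructor
      · intro h; exact absurd h (by simp)
      · rintro ⟨e', he', hle, _⟩
        rcases List.mem_cons.mp he' with rfl | he'
        · omega
        · have := hlt e' he'; omega
    · rw [if_neg h1]
      by_cases h2 : PySem.Int.mod (g - e) mv = 0
      · rw [if_pos h2]
        constructor
        · intro _; exact ⟨e, List.mem_cons_self, by omega, h2⟩
        · intro _; rfl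
      · rw [if_neg h2]
        rw [ih htail]
        constructor
        · rintro ⟨e', he', hle, hm⟩; exact ⟨e', List.mem_cons_of_mem _ he', hle, hm⟩
        · rintro ⟨e', he', hle, hm⟩
          rcases List.mem_cons.mp he' with rfl | he'
          · exact absurd hm h2
          · exact ⟨e', he', hle, hm⟩

-- find? on a strictly increasing list returns a minimal satisfying element
theorem pvFind_le (p : Int → Bool) (l : List Int) (hs : l.Pairwise (· < ·)) (e0 : Int)
    (hf : l.find? p = some e0) : ∀ e ∈ l, p e = true → e0 ≤ e := by
  induction l with
  | nil => simp at hf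
  | cons a rest ih =>
    obtain ⟨hlt, htail⟩ := List.pairwise_cons.mp hs
    rw [List.find?_cons] at hf
    cases ha : p a with
    | false =>
      rw [ha] at hf
      intro e he hpe
      rcases List.mem_cons.mp he with rfl | he
      · exact absurd hpe (by simp [ha])
      · exact ih htail hf e he hpe
    | true =>
      rw [ha] at hf
      obtain rfl : a = e0 := by injection hf
      intro e he _
      rcases List.mem_cons.mp he with rfl | he
      · exact le_refl _
      · exact le_of_lt (hlt e he)

theorem pvMain (gaps : List Int) (move : Int) (hmv : move ≠ 0) :
    positionAfterPlayingMove gaps move = positionAfterPlayingMove_alt gaps move := by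
  unfold positionAfterPlayingMove positionAfterPlayingMove_alt
  simp only []
  set mx := (PySem.List.max? gaps (fun x => x)).getD 0 with hmx
  set part := (PySem.List.pyRange 0 mx 1).filter (fun e => decide (e ∉ gaps)) with hpart
  have hsort : part.Pairwise (· < ·) :=
    (PySem.List.pairwise_lt_pyRange_one 0 mx).filter _
  have hfilt : (PySem.List.pyRange 0 mx 1).filter
      (fun e => !(PySem.Set.contains (PySem.Set.ofList gaps) e)) = part := by
    rw [hpart]; apply List.filter_congr; intro e _
    by_cases h : e ∈ gaps <;> simp [h, PySem.Set.mem_ofList]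
  have hget : ∀ r : Int, ((PySem.List.pyRange 0 mx 1).foldl
      (fun (d : Std.HashMap Int Int) e =>
        if !(PySem.Set.contains (PySem.Set.ofList gaps) e) then
          if !(d.contains (PySem.Int.mod e move)) then
            d.insert (PySem.Int.mod e move) e
          else d
        else d) Std.HashMap.emptyWithCapacity)[r]?
      = part.find? (fun e => PySem.Int.mod e move == r) := by
    intro r
    rw [pvGetFoldD move (PySem.Set.contains (PySem.Set.ofList gaps)) _ _ r, hfilt]
    simp
  rw [PySem.List.foldl_append_if_eq_filter, List.nil_append]
  apply List.filter_congr
  intro g hg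
  have hmem : (decide (g ∉ gaps.filter (fun gap => pvInnerA gap move part)))
      = !(pvInnerA g move part) := by
    by_cases h : pvInnerA g move part <;> simp [h, List.mem_filter, hg]
  rw [hmem, hget (PySem.Int.mod g move)]
  cases hF : part.find? (fun e => PySem.Int.mod e move == PySem.Int.mod g move) with
  | none =>
    have hinner : pvInnerA g move part = false := by
      rw [Bool.eq_false_iff]; intro ht
      obtain ⟨e, he, hle, hm⟩ := (pvInnerA_iff g move part hsort).mp ht
      have := List.find?_eq_none.mp hF e he
      simp [(pvModEq g e move hmv).mp hm] at this
    simp [hinner]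
  | some e0 =>
    have he0 : e0 ∈ part := List.mem_of_find?_eq_some hF
    have hpe0 : PySem.Int.mod e0 move = PySem.Int.mod g move := by
      have := List.find?_some hF
      simpa using this
    by_cases hle : e0 ≤ g
    · have hinner : pvInnerA g move part = true :=
        (pvInnerA_iff g move part hsort).mpr ⟨e0, he0, hle, (pvModEq g e0 move hmv).mpr hpe0⟩
      simp [hinner]
      omega
    · have hinner : pvInnerA g move part = false := by
        rw [Bool.eq_false_iff]; intro ht
        obtain ⟨e, he, hleg, hm⟩ := (pvInnerA_iff g move part hsort).mp ht
        have hpe : (fun e => PySem.Int.mod e move == PySem.Int.mod g move) e = true := by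
          simp [(pvModEq g e move hmv).mp hm]
        have := pvFind_le _ part hsort e0 hF e he hpe
        omega
      simp [hinner]
      omega

-- ===== VERDICT (by name: the statement is the Claim_ definition above) =====
theorem positionAfterPlayingMove_spec : Claim_equal_positionAfterPlayingMove := by
  intro gaps move _ hpre
  unfold Spec_positionAfterPlayingMove
  exact pvMain gaps move hpre.2
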